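-- pv_equiv track=rewrite | github.com/jh-sbu/All-the-RAG | datasources/aws/test_chunk_text.py | _reconstruct_from_chunks
-- ===== SOURCE A (Python) =====
-- def _reconstruct_from_chunks(chunks: list[str]) -> str:
--     """
--     Rebuild the original text from overlapping chunks by
--     removing the maximal exact overlap between consecutive chunks.
--     """
--     if not chunks:
--         return ""
--     out = chunks[0]
--     for nxt in chunks[1:]:
--         # find the largest k such that out[-k:] == nxt[:k]
--         max_k = min(len(out), len(nxt))
--         k = 0
--         for kk in range(max_k, 0, -1):
--             if out[-kk:] == nxt[:kk]:
--                 k = kk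
--                 break
--         out += nxt[k:]
--     return out
-- ===== SOURCE B (Python) =====
-- def _reconstruct_from_chunks(chunks: list[str]) -> str:
--     """
--     Rebuild the original text from overlapping chunks: the maximal overlap
--     between out and the next chunk is the longest border (KMP prefix
--     function) of nxt + '\x00' + tail-of-out.
--     """
--     if not chunks:
--         return ""
--     out = chunks[0]
--     for nxt in chunks[1:]:
--         m = min(len(out), len(nxt))
--         s = nxt + "\x00" + out[len(out) - m:]
--         pi = [0]
--         k = 0
--         for i in range(1, len(s)):
--             c = s[i]
--             while k > 0 and s[k] != c:
--                 k = pi[k - 1]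
--             if s[k] == c:
--                 k += 1
--             pi.append(k)
--         out += nxt[k:]
--     return out
-- ===== Notes on version B (the rewrite author's own statement) =====
-- stated objective: alternative
-- what changed: The per-chunk downward scan that tries every overlap length k with a slice comparison is replaced by a single KMP prefix-function pass over nxt + '\x00' + tail-of-out, whose final value is the maximal overlap.
import Mathlib
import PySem

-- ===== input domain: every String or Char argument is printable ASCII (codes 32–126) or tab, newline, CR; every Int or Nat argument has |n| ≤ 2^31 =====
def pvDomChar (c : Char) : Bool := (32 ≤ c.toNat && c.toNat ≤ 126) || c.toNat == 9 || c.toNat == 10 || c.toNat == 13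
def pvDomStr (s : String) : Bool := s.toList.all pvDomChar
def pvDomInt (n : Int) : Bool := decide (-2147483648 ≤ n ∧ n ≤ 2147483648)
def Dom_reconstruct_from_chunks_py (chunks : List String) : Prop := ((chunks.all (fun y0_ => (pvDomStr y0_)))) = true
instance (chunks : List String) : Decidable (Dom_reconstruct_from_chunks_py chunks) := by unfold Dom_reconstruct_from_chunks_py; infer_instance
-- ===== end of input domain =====

-- B replaces A's per-chunk downward scan for the maximal out/nxt overlap by a single
-- KMP prefix-function pass over nxt ++ '\x00' ++ tail-of-out (objective: alternative algorithm).


-- ===== PORT A =====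
-- `for kk in range(max_k, 0, -1): if out[-kk:] == nxt[:kk]: k = kk; break` (k = 0 if no break)
def aLoop (out nxt : List Char) : Nat → Nat
  | 0 => 0
  | kk + 1 =>
    if PySem.List.slice out (some (-((kk + 1 : Nat) : Int))) none
        = PySem.List.slice nxt none (some ((kk + 1 : Nat) : Int))
    then kk + 1
    else aLoop out nxt kk

-- one iteration of A's `for nxt in chunks[1:]` body
def aStep (out nxt : List Char) : List Char :=
  let max_k := min out.length nxt.length
  let k := aLoop out nxt max_k
  out ++ PySem.List.slice nxt (some (k : Nat)) none

def reconstruct_from_chunks_py (chunks : List String) : String :=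
  match chunks with
  | [] => ""
  | c0 :: rest => String.ofList ((rest.map String.toList).foldl aStep c0.toList)

-- ===== PORT B =====
-- `while k > 0 and s[k] != c: k = pi[k-1]` — fuel-indexed: each iteration strictly
-- decreases k (pi[j] ≤ j for the computed prefix function), so fuel = initial k is exact.
def bFB (s : List Char) (pi : List Nat) (c : Char) : Nat → Nat → Nat
  | 0, k => k
  | fuel + 1, k =>
    if 0 < k ∧ s.getD k (Char.ofNat 0) ≠ c then bFB s pi c fuel (pi.getD (k - 1) 0) else k

-- `pi = [0]; k = 0; for i in range(1, len(s)): ...` — returns (pi, k)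
def bStepInner (s : List Char) : List Nat × Nat :=
  (PySem.List.pyRange 1 (s.length : Int) 1).foldl
    (fun st i =>
      let c := PySem.List.pyGetD s i (Char.ofNat 0)
      let k1 := bFB s st.1 c st.2 st.2
      let k2 := if s.getD k1 (Char.ofNat 0) = c then k1 + 1 else k1
      (st.1 ++ [k2], k2))
    ([0], 0)

-- one iteration of B's `for nxt in chunks[1:]` body
def bStep (out nxt : List Char) : List Char :=
  let m := min out.length nxt.length
  let s := nxt ++ Char.ofNat 0 :: PySem.List.slice out (some ((out.length - m : Nat) : Int)) none
  let k := (bStepInner s).2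
  out ++ PySem.List.slice nxt (some (k : Nat)) none

def reconstruct_from_chunks_py_alt (chunks : List String) : String :=
  match chunks with
  | [] => ""
  | c0 :: rest => String.ofList ((rest.map String.toList).foldl bStep c0.toList)

-- ===== PRECONDITION & SPEC =====
def Spec_reconstruct_from_chunks_py (chunks : List String) (out : String) : Prop := out = reconstruct_from_chunks_py_alt chunks
instance (chunks : List String) (out : String) : Decidable (Spec_reconstruct_from_chunks_py chunks out) := by unfold Spec_reconstruct_from_chunks_py; infer_instance

-- ===== CLAIM (what is proved, stated in full; the proofs are below) =====
def Claim_equal_reconstruct_from_chunks_py : Prop := ∀ (chunks : List String), Dom_reconstruct_from_chunks_py chunks → Spec_reconstruct_from_chunks_py chunks (reconstruct_from_chunks_py chunks)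

-- ===== LEMMAS AND PROOFS =====

-- `bordB t k`: the length-k prefix of t equals its length-k suffix (k a "border" length, not nec. proper)
def bordB (t : List Char) (k : Nat) : Bool := decide (k ≤ t.length) && (t.take k == t.drop (t.length - k))
-- `properB t k`: k is a proper border length of t
def properB (t : List Char) (k : Nat) : Bool := decide (k < t.length) && bordB t k
-- longest proper border length of t (0 for t = [])
def lb (t : List Char) : Nat := Nat.findGreatest (fun k => properB t k = true) t.length
-- overlap test of A: out[-k:] == nxt[:k]
def ovB (out nxt : List Char) (k : Nat) : Bool := out.drop (out.length - k) == nxt.take k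
-- the value both programs compute per step
def maxOv (out nxt : List Char) : Nat :=
  Nat.findGreatest (fun k => ovB out nxt k = true) (min out.length nxt.length)

theorem bordB_iff (t : List Char) (k : Nat) :
    bordB t k = true ↔ k ≤ t.length ∧ t.take k = t.drop (t.length - k) := by
  simp [bordB]

theorem bordB_zero (t : List Char) : bordB t 0 = true := by
  simp [bordB]

theorem properB_iff (t : List Char) (k : Nat) :
    properB t k = true ↔ k < t.length ∧ bordB t k = true := by
  simp [properB]

-- border of a border (downward): a border a ≤ b of t is a border of t.take b
theorem bord_take (t : List Char) (a b : Nat) (ha : bordB t a = true) (hb : bordB t b = true)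
    (hab : a ≤ b) : bordB (t.take b) a = true := by
  rw [bordB_iff] at ha hb ⊢
  obtain ⟨hal, hae⟩ := ha
  obtain ⟨hbl, hbe⟩ := hb
  refine ⟨by simp; omega, ?_⟩
  rw [List.take_take, min_eq_left hab, List.length_take, min_eq_left hbl, hbe,
    List.drop_drop, hae]
  congr 1
  omega

-- border of a border (upward): a border of t.take b, for b a border of t, is a border of t
theorem bord_of_bord_take (t : List Char) (a b : Nat) (ha : bordB (t.take b) a = true)
    (hb : bordB t b = true) : bordB t a = true := by
  rw [bordB_iff] at ha hb ⊢
  obtain ⟨hal, hae⟩ := ha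
  obtain ⟨hbl, hbe⟩ := hb
  rw [List.length_take, min_eq_left hbl] at hal hae
  refine ⟨le_trans hal hbl, ?_⟩
  have h1 : t.take a = (t.take b).drop (b - a) := by
    rw [← hae, List.take_take, min_eq_left hal]
  rw [h1, hbe, List.drop_drop]
  congr 1
  omega

-- extension: k+1 is a border of s.take (i+1) iff k is a border of s.take i and s[k] = s[i]
theorem bord_extend (s : List Char) (i k : Nat) (hi : i < s.length) (hk : k ≤ i) :
    (bordB (s.take (i + 1)) (k + 1) = true ↔
      bordB (s.take i) k = true ∧ s.getD k (Char.ofNat 0) = s.getD i (Char.ofNat 0)) := by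
  have hkl : k < s.length := lt_of_le_of_lt hk hi
  have hti : (s.take i).length = i := by simp; omega
  have h1 : (s.take (i + 1)).take (k + 1) = s.take k ++ [s[k]] := by
    rw [List.take_take, min_eq_left (by omega), List.take_add_one, List.getElem?_eq_getElem hkl]
    rfl
  have h2 : s.take (i + 1) = s.take i ++ [s[i]] := by
    rw [List.take_add_one, List.getElem?_eq_getElem hi]
    rfl
  have hlen1 : (s.take (i + 1)).length = i + 1 := by simp; omega
  have h3 : (s.take (i + 1)).drop ((s.take (i + 1)).length - (k + 1))
      = (s.take i).drop (i - k) ++ [s[i]] := by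
    rw [hlen1, show i + 1 - (k + 1) = i - k from by omega, h2,
      List.drop_append_of_le_length (by omega)]
  rw [bordB_iff, h1, h3]
  constructor
  · rintro ⟨-, he⟩
    obtain ⟨he1, he2⟩ := List.append_inj' he rfl
    refine ⟨?_, ?_⟩
    · rw [bordB_iff]
      exact ⟨by omega, by rw [List.take_take, min_eq_left hk, hti, he1]⟩
    · rw [List.getD_eq_getElem s _ hkl, List.getD_eq_getElem s _ hi]
      exact List.singleton_injective he2
  · rintro ⟨hb, hc⟩
    rw [bordB_iff] at hb
    obtain ⟨-, he⟩ := hb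
    rw [List.take_take, min_eq_left hk, hti] at he
    refine ⟨by simp; omega, ?_⟩
    rw [← he, List.getD_eq_getElem s _ hkl, List.getD_eq_getElem s _ hi] at *
    rw [hc]

theorem lb_lt (t : List Char) (ht : t ≠ []) : lb t < t.length := by
  have hlen : 0 < t.length := List.length_pos_of_ne_nil ht
  have h0 : properB t 0 = true := by simp [properB, bordB_zero]; omega
  have hspec := Nat.findGreatest_spec (P := fun k => properB t k = true) (Nat.zero_le t.length) h0
  unfold lb
  exact ((properB_iff t _).mp hspec).1

theorem lb_bord (t : List Char) (ht : t ≠ []) : bordB t (lb t) = true := by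
  have hlen : 0 < t.length := List.length_pos_of_ne_nil ht
  have h0 : properB t 0 = true := by simp [properB, bordB_zero]; omega
  have hspec := Nat.findGreatest_spec (P := fun k => properB t k = true) (Nat.zero_le t.length) h0
  unfold lb
  exact ((properB_iff t _).mp hspec).2

theorem le_lb (t : List Char) (k : Nat) (hb : bordB t k = true) (hk : k < t.length) :
    k ≤ lb t := by
  exact Nat.le_findGreatest (le_of_lt hk) (by simp [properB, hb, hk])

theorem lb_eq_of (t : List Char) (m : Nat) (hm : properB t m = true)
    (hmax : ∀ b, properB t b = true → b ≤ m) : lb t = m := by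
  have hm' : m ≤ t.length := by
    simp only [properB, Bool.and_eq_true, decide_eq_true_eq] at hm
    omega
  unfold lb
  refine le_antisymm ?_ (Nat.le_findGreatest hm' hm)
  exact hmax _ (Nat.findGreatest_spec (P := fun k => properB t k = true) hm' hm)

theorem lb_singleton (c : Char) : lb [c] = 0 := by
  refine lb_eq_of _ _ (by simp [properB, bordB_zero]) ?_
  intro b hb
  simp only [properB, Bool.and_eq_true, decide_eq_true_eq, List.length_singleton] at hb
  omega

-- the fallback loop: from k0, returns the largest border r ≤ k0 of s.take i with s[r] = c (or r = 0)
theorem bFB_spec (s : List Char) (pi : List Nat) (c : Char) (i : Nat)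
    (hi : i < s.length) (hi0 : 0 < i)
    (hpi : ∀ j, j + 1 ≤ i → pi.getD j 0 = lb (s.take (j + 1))) :
    ∀ fuel k0, k0 ≤ fuel → bordB (s.take i) k0 = true → k0 < i →
      bordB (s.take i) (bFB s pi c fuel k0) = true ∧
      bFB s pi c fuel k0 < i ∧ bFB s pi c fuel k0 ≤ k0 ∧
      (bFB s pi c fuel k0 = 0 ∨ s.getD (bFB s pi c fuel k0) (Char.ofNat 0) = c) ∧
      (∀ b, bordB (s.take i) b = true → b ≤ k0 → s.getD b (Char.ofNat 0) = c →
        b ≤ bFB s pi c fuel k0) := by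
  intro fuel
  induction fuel with
  | zero =>
    intro k0 hk0 hb hki
    have hz : k0 = 0 := Nat.le_zero.mp hk0
    subst hz
    exact ⟨bordB_zero _, hi0, le_refl _, Or.inl rfl, fun b _ hb0 _ => hb0⟩
  | succ fuel ih =>
    intro k0 hk0 hb hki
    rw [bFB]
    by_cases hc : 0 < k0 ∧ s.getD k0 (Char.ofNat 0) ≠ c
    · rw [if_pos hc]
      have hpik : pi.getD (k0 - 1) 0 = lb (s.take k0) := by
        have := hpi (k0 - 1) (by omega)
        rwa [show k0 - 1 + 1 = k0 from by omega] at this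
      rw [hpik]
      have hlen0 : (s.take k0).length = k0 := by simp; omega
      have hne : s.take k0 ≠ [] := by
        apply List.ne_nil_of_length_pos
        omega
      have hk1lt : lb (s.take k0) < k0 := by
        have := lb_lt _ hne
        omega
      have htk : (s.take i).take k0 = s.take k0 := by
        rw [List.take_take, min_eq_left (le_of_lt hki)]
      have hb1 : bordB (s.take i) (lb (s.take k0)) = true := by
        apply bord_of_bord_take _ _ k0 _ hb
        rw [htk]
        exact lb_bord _ hne
      obtain ⟨r1, r2, r3, r4, r5⟩ := ih (lb (s.take k0)) (by omega) hb1 (by omega)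
      refine ⟨r1, r2, by omega, r4, ?_⟩
      intro b hbb hbk0 hbc
      have hbne : b ≠ k0 := by
        intro he
        exact hc.2 (he ▸ hbc)
      have hblt : b < k0 := lt_of_le_of_ne hbk0 hbne
      have hbtake : bordB (s.take k0) b = true := by
        rw [← htk]
        exact bord_take _ _ _ hbb hb hbk0
      exact r5 b hbb (le_lb _ _ hbtake (by omega)) hbc
    · rw [if_neg hc]
      rw [not_and_or, not_not] at hc
      refine ⟨hb, hki, le_refl _, ?_, fun b _ hb0 _ => hb0⟩
      rcases hc with hc | hc
      · exact Or.inl (by omega)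
      · exact Or.inr hc

-- one outer iteration advances lb(s.take i) to lb(s.take (i+1))
theorem kmp_step (s : List Char) (pi : List Nat) (i : Nat) (hi : i < s.length) (hi0 : 0 < i)
    (hpi : ∀ j, j + 1 ≤ i → pi.getD j 0 = lb (s.take (j + 1))) :
    (if s.getD (bFB s pi (s.getD i (Char.ofNat 0)) (lb (s.take i)) (lb (s.take i)))
          (Char.ofNat 0) = s.getD i (Char.ofNat 0)
     then bFB s pi (s.getD i (Char.ofNat 0)) (lb (s.take i)) (lb (s.take i)) + 1
     else bFB s pi (s.getD i (Char.ofNat 0)) (lb (s.take i)) (lb (s.take i)))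
      = lb (s.take (i + 1)) := by
  have hleni : (s.take i).length = i := by simp; omega
  have hlen1 : (s.take (i + 1)).length = i + 1 := by simp; omega
  have hne : s.take i ≠ [] := List.ne_nil_of_length_pos (by omega)
  have hk0b : bordB (s.take i) (lb (s.take i)) = true := lb_bord _ hne
  have hk0lt : lb (s.take i) < i := by have := lb_lt _ hne; omega
  obtain ⟨r1, r2, r3, r4, r5⟩ :=
    bFB_spec s pi (s.getD i (Char.ofNat 0)) i hi hi0 hpi (lb (s.take i)) (lb (s.take i))
      (le_refl _) hk0b hk0lt
  by_cases hm : s.getD (bFB s pi (s.getD i (Char.ofNat 0)) (lb (s.take i)) (lb (s.take i)))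
      (Char.ofNat 0) = s.getD i (Char.ofNat 0)
  · rw [if_pos hm]
    refine (lb_eq_of _ _ ?_ ?_).symm
    · rw [properB_iff]
      refine ⟨by omega, ?_⟩
      exact (bord_extend s i _ hi (by omega)).mpr ⟨r1, hm⟩
    · intro b hpb
      rw [properB_iff] at hpb
      obtain ⟨hblt, hbb⟩ := hpb
      rw [hlen1] at hblt
      match b, hblt with
      | 0, _ => omega
      | b' + 1, hblt =>
        obtain ⟨hb1, hb2⟩ := (bord_extend s i b' hi (by omega)).mp hbb
        have hble : b' ≤ lb (s.take i) := le_lb _ _ hb1 (by omega)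
        have := r5 b' hb1 hble hb2
        omega
  · rw [if_neg hm]
    have hr0 : bFB s pi (s.getD i (Char.ofNat 0)) (lb (s.take i)) (lb (s.take i)) = 0 := by
      rcases r4 with h | h
      · exact h
      · exact absurd h hm
    rw [hr0]
    refine (lb_eq_of _ _ ?_ ?_).symm
    · rw [properB_iff]
      exact ⟨by omega, bordB_zero _⟩
    · intro b hpb
      rw [properB_iff] at hpb
      obtain ⟨hblt, hbb⟩ := hpb
      rw [hlen1] at hblt
      match b, hblt with
      | 0, _ => omega
      | b' + 1, hblt =>
        obtain ⟨hb1, hb2⟩ := (bord_extend s i b' hi (by omega)).mp hbb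
        have hble : b' ≤ lb (s.take i) := le_lb _ _ hb1 (by omega)
        have := r5 b' hb1 hble hb2
        rw [hr0] at this
        have hb'0 : b' = 0 := by omega
        subst hb'0
        rw [hr0] at hm
        exact absurd hb2 hm

-- the whole inner fold computes the prefix-function table and the last value lb s
theorem bStepInner_spec (s : List Char) (hs : s ≠ []) :
    bStepInner s = ((List.range s.length).map (fun j => lb (s.take (j + 1))), lb s) := by
  have hlen : 0 < s.length := List.length_pos_of_ne_nil hs
  have key : ∀ n i0, 0 < i0 → i0 ≤ s.length → n = s.length - i0 →
      (PySem.List.pyRange (i0 : Int) (s.length : Int) 1).foldl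
        (fun st i =>
          let c := PySem.List.pyGetD s i (Char.ofNat 0)
          let k1 := bFB s st.1 c st.2 st.2
          let k2 := if s.getD k1 (Char.ofNat 0) = c then k1 + 1 else k1
          (st.1 ++ [k2], k2))
        ((List.range i0).map (fun j => lb (s.take (j + 1))), lb (s.take i0))
      = ((List.range s.length).map (fun j => lb (s.take (j + 1))), lb (s.take s.length)) := by
    intro n
    induction n with
    | zero =>
      intro i0 hpos hle hn
      have : i0 = s.length := by omega
      subst this
      rw [PySem.List.pyRange_one_eq_nil (le_refl _)]
      rfl
    | succ n ih =>
      intro i0 hpos hle hn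
      have hlt : i0 < s.length := by omega
      rw [PySem.List.pyRange_one_cons (by exact_mod_cast hlt), List.foldl_cons]
      have hpi : ∀ j, j + 1 ≤ i0 →
          (((List.range i0).map (fun j => lb (s.take (j + 1)))).getD j 0)
            = lb (s.take (j + 1)) := by
        intro j hj
        rw [List.getD_eq_getElem _ _ (by simp; omega), List.getElem_map, List.getElem_range]
      have hstep := kmp_step s ((List.range i0).map (fun j => lb (s.take (j + 1)))) i0 hlt hpos hpi
      have hbody :
          (let c := PySem.List.pyGetD s (i0 : Int) (Char.ofNat 0)
           let k1 := bFB s ((List.range i0).map (fun j => lb (s.take (j + 1)))) c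
             (lb (s.take i0)) (lb (s.take i0))
           let k2 := if s.getD k1 (Char.ofNat 0) = c then k1 + 1 else k1
           (((List.range i0).map (fun j => lb (s.take (j + 1)))) ++ [k2], k2))
          = ((List.range (i0 + 1)).map (fun j => lb (s.take (j + 1))), lb (s.take (i0 + 1))) := by
        simp only [PySem.List.pyGetD_natCast]
        rw [hstep, List.range_succ, List.map_append]
        simp
      rw [hbody, show ((i0 : Int) + 1) = ((i0 + 1 : Nat) : Int) from by push_cast; ring]
      exact ih (i0 + 1) (by omega) (by omega) (by omega)
  have hinit : (([0], 0) : List Nat × Nat)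
      = ((List.range 1).map (fun j => lb (s.take (j + 1))), lb (s.take 1)) := by
    match s, hs with
    | a :: t, _ =>
      simp [List.range_succ, lb_singleton]
  unfold bStepInner
  rw [hinit]
  have := key (s.length - 1) 1 (by omega) (by omega) rfl
  rw [Int.natCast_one] at this
  rw [this, List.take_length]

-- A's inner loop is the greatest overlap
theorem aLoop_eq (out nxt : List Char) (kk : Nat) :
    aLoop out nxt kk = Nat.findGreatest (fun k => ovB out nxt k = true) kk := by
  induction kk with
  | zero => rfl
  | succ n ih =>
    rw [aLoop, Nat.findGreatest_succ,
      PySem.List.slice_from_neg_natCast out (n + 1) (Nat.succ_pos n),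
      PySem.List.slice_to_natCast]
    by_cases h : out.drop (out.length - (n + 1)) = nxt.take (n + 1)
    · simp [ovB, h]
    · simp [ovB, h, ih]

-- with a separator absent from nxt, borders of s = nxt ++ sep :: tail are exactly overlaps
theorem lb_sep (out nxt : List Char) (hsep : Char.ofNat 0 ∉ nxt) :
    lb (nxt ++ Char.ofNat 0 :: out.drop (out.length - min out.length nxt.length))
      = maxOv out nxt := by
  set m := min out.length nxt.length with hm
  set tail := out.drop (out.length - m) with htail
  have htl : tail.length = m := by simp [htail]; omega
  have hsl : (nxt ++ Char.ofNat 0 :: tail).length = nxt.length + 1 + m := by simp [htl]; omega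
  -- any border of s is at most m
  have hA : ∀ k, bordB (nxt ++ Char.ofNat 0 :: tail) k = true →
      k < (nxt ++ Char.ofNat 0 :: tail).length → k ≤ m := by
    intro k hb hk
    by_contra hgt
    rw [not_le] at hgt
    rw [bordB_iff] at hb
    obtain ⟨-, he⟩ := hb
    have hj : k - m - 1 < nxt.length := by omega
    have hjk : k - m - 1 < k := by omega
    have h1 : ((nxt ++ Char.ofNat 0 :: tail).take k)[k - m - 1]? = some nxt[k - m - 1] := by
      rw [List.getElem?_take_of_lt hjk, List.getElem?_append_left hj,
        List.getElem?_eq_getElem hj]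
    have h2 : ((nxt ++ Char.ofNat 0 :: tail).drop
        ((nxt ++ Char.ofNat 0 :: tail).length - k))[k - m - 1]? = some (Char.ofNat 0) := by
      rw [List.getElem?_drop,
        show (nxt ++ Char.ofNat 0 :: tail).length - k + (k - m - 1) = nxt.length from by omega,
        List.getElem?_append_right (le_refl _), Nat.sub_self]
      rfl
    rw [he, h2] at h1
    have hvc : nxt[k - m - 1] = Char.ofNat 0 := (Option.some_injective _ h1).symm
    exact hsep (hvc ▸ List.getElem_mem hj)
  -- for k ≤ m, border of s ↔ overlap
  have hB : ∀ k, k ≤ m → (bordB (nxt ++ Char.ofNat 0 :: tail) k = true ↔ ovB out nxt k = true) := by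
    intro k hkm
    have h1 : (nxt ++ Char.ofNat 0 :: tail).take k = nxt.take k := by
      rw [List.take_append, show k - nxt.length = 0 from by omega]
      simp
    have h2 : (nxt ++ Char.ofNat 0 :: tail).drop ((nxt ++ Char.ofNat 0 :: tail).length - k)
        = out.drop (out.length - k) := by
      rw [List.drop_append, List.drop_eq_nil_of_le (by omega),
        show (nxt ++ Char.ofNat 0 :: tail).length - k - nxt.length = (m - k) + 1 from by omega,
        List.drop_succ_cons, htail, List.drop_drop]
      simp only [List.nil_append]
      rw [show out.length - m + (m - k) = out.length - k from by omega]
    rw [bordB_iff, ovB, beq_iff_eq, h1, h2]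
    constructor
    · rintro ⟨-, he⟩
      exact he.symm
    · intro he
      exact ⟨by omega, he.symm⟩
  have hov0 : ovB out nxt 0 = true := by simp [ovB]
  apply le_antisymm
  · by_cases h0 : lb (nxt ++ Char.ofNat 0 :: tail) = 0
    · omega
    · have hp := lb_bord (nxt ++ Char.ofNat 0 :: tail) (by simp)
      have hlt := lb_lt (nxt ++ Char.ofNat 0 :: tail) (by simp)
      have hle : lb (nxt ++ Char.ofNat 0 :: tail) ≤ m := hA _ hp hlt
      exact Nat.le_findGreatest hle ((hB _ hle).mp hp)
  · have hovm : ovB out nxt (maxOv out nxt) = true :=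
      Nat.findGreatest_spec (P := fun k => ovB out nxt k = true) (Nat.zero_le _) hov0
    have hlem : maxOv out nxt ≤ m := Nat.findGreatest_le _
    exact le_lb _ _ ((hB _ hlem).mpr hovm) (by omega)

theorem step_eq (out nxt : List Char) (hsep : Char.ofNat 0 ∉ nxt) :
    aStep out nxt = bStep out nxt := by
  simp only [aStep, bStep]
  rw [show PySem.List.slice out (some ((out.length - min out.length nxt.length : Nat) : Int)) none
      = out.drop (out.length - min out.length nxt.length) from
    PySem.List.slice_from_natCast _ _]
  rw [bStepInner_spec _ (by simp), lb_sep out nxt hsep, aLoop_eq]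
  rfl

-- the whole accumulation loop agrees when no chunk contains the separator
theorem foldl_step_eq (l : List (List Char)) :
    ∀ acc, (∀ x ∈ l, Char.ofNat 0 ∉ x) → l.foldl aStep acc = l.foldl bStep acc := by
  induction l with
  | nil => intro acc _; rfl
  | cons x xs ih =>
    intro acc hsep
    rw [List.foldl_cons, List.foldl_cons, step_eq acc x (hsep x (by simp)),
      ih _ (fun y hy => hsep y (by simp [hy]))]

theorem dom_no_sep (str : String) (h : pvDomStr str = true) :
    Char.ofNat 0 ∉ str.toList := by
  intro hmem
  rw [pvDomStr, List.all_eq_true] at h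
  have := h _ hmem
  simp [pvDomChar] at this

-- ===== VERDICT (by name: the statement is the Claim_ definition above) =====
theorem reconstruct_from_chunks_py_spec : Claim_equal_reconstruct_from_chunks_py := by
  intro chunks hdom
  show reconstruct_from_chunks_py chunks = reconstruct_from_chunks_py_alt chunks
  match chunks, hdom with
  | [], _ => rfl
  | c0 :: rest, hdom =>
    show String.ofList ((rest.map String.toList).foldl aStep c0.toList)
        = String.ofList ((rest.map String.toList).foldl bStep c0.toList)
    rw [foldl_step_eq]
    intro x hx
    rw [List.mem_map] at hx
    obtain ⟨str, hstr, rfl⟩ := hx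
    apply dom_no_sep
    rw [Dom_reconstruct_from_chunks_py, List.all_eq_true] at hdom
    exact hdom _ (by simp [hstr])
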